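-- pv_equiv track=rewrite | github.com/blchu/mlab-intuit-fa18 | revised/src/preprocess/coref.py | label_positions
-- ===== SOURCE A (Python) =====
-- def label_positions(lsls):
--     sen_pos = 0
--     word_pos = 0
--     label_dic = {}
--     for sen in lsls:
--         start = word_pos
--         end = word_pos + len(sen) - 1
--         label_dic[sen_pos] = [start,end]
--         word_pos = end + 1
--         sen_pos += 1
--     return label_dic
-- ===== SOURCE B (Python) =====
-- def label_positions(lsls):
--     # pass 1: cumulative end-offset table
--     cum = [0]
--     for sen in lsls:
--         cum.append(cum[-1] + len(sen))
--     # pass 2: assemble the dict by index from the table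
--     return {i: [cum[i], cum[i + 1] - 1] for i in range(len(lsls))}
-- ===== Notes on version B (the rewrite author's own statement) =====
-- stated objective: alternative
-- what changed: Replaces A's single loop carrying sen_pos/word_pos/dict state with two separate passes: first a cumulative-offset table built by appending prefix sums, then a dict comprehension reading start/end from the table by index.
import Mathlib
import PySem

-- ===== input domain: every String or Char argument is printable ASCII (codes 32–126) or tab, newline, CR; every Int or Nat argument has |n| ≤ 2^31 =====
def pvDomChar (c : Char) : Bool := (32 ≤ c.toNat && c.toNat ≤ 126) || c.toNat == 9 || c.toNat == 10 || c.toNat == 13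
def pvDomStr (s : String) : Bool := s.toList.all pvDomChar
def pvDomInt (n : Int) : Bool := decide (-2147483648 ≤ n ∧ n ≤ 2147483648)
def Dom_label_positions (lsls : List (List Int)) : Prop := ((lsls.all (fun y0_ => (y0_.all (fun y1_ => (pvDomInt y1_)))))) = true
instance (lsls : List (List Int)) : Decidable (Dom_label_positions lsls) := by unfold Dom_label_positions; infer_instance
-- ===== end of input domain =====

-- B replaces A's single running-accumulator loop with two passes (a prefix-sum table, then an index-based
-- dict comprehension); equivalence of the returned dict (as an ordered item list) is proved for all inputs.

-- ===== PORT A =====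
-- A's loop: state (sen_pos, word_pos, label_dic), one insert per sentence.
def labelLoopA : List (List Int) → Int → Int → PySem.Dict Int (List Int) → PySem.Dict Int (List Int)
  | [], _, _, d => d
  | sen :: rest, sen_pos, word_pos, d =>
      let start := word_pos
      let «end» := word_pos + (sen.length : Int) - 1
      labelLoopA rest (sen_pos + 1) («end» + 1) (d.insert sen_pos [start, «end»])

def label_positions (lsls : List (List Int)) : List (Int × List Int) :=
  (labelLoopA lsls 0 0 PySem.Dict.empty).items

-- ===== PORT B =====
-- pass 1 of Source B: cum = [0]; for sen in lsls: cum.append(cum[-1] + len(sen))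
def buildCum (lsls : List (List Int)) : List Int :=
  lsls.foldl (fun cum sen => cum ++ [cum.getLastD 0 + (sen.length : Int)]) [0]

-- pass 2 of Source B: {i: [cum[i], cum[i+1] - 1] for i in range(len(lsls))}
def label_positions_alt (lsls : List (List Int)) : List (Int × List Int) :=
  let cum := buildCum lsls
  (List.range lsls.length).map (fun (i : Nat) => ((i : Int), [cum.getD i 0, cum.getD (i + 1) 0 - 1]))

-- ===== PRECONDITION & SPEC =====
def Spec_label_positions (lsls : List (List Int)) (out : List (Int × List Int)) : Prop := out = label_positions_alt lsls
instance (lsls : List (List Int)) (out : List (Int × List Int)) : Decidable (Spec_label_positions lsls out) := by unfold Spec_label_positions; infer_instance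

-- ===== CLAIM (what is proved, stated in full; the proofs are below) =====
def Claim_equal_label_positions : Prop := ∀ (lsls : List (List Int)), Dom_label_positions lsls → Spec_label_positions lsls (label_positions lsls)

-- ===== LEMMAS AND PROOFS =====

-- canonical emission both sides are reduced to
def emit : List (List Int) → Int → Int → List (Int × List Int)
  | [], _, _ => []
  | sen :: rest, sp, wp => (sp, [wp, wp + (sen.length : Int) - 1]) :: emit rest (sp + 1) (wp + sen.length)

-- canonical prefix table
def pref : List (List Int) → Int → List Int
  | [], w => [w]
  | sen :: rest, w => w :: pref rest (w + sen.length)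

lemma buildCum_gen (lsls : List (List Int)) : ∀ (pre : List Int) (w : Int),
    lsls.foldl (fun cum sen => cum ++ [cum.getLastD 0 + (sen.length : Int)]) (pre ++ [w])
      = pre ++ pref lsls w := by
  induction lsls with
  | nil => intro pre w; simp [pref]
  | cons sen rest ih =>
      intro pre w
      simp only [List.foldl_cons, pref]
      have h : (pre ++ [w]).getLastD 0 = w := by simp
      rw [h, List.append_assoc]
      have := ih (pre ++ [w]) (w + sen.length)
      simpa [List.append_assoc] using this

lemma buildCum_eq_pref (lsls : List (List Int)) : buildCum lsls = pref lsls 0 := by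
  have := buildCum_gen lsls [] 0
  simpa [buildCum] using this

lemma map_range_pref (lsls : List (List Int)) : ∀ (sp wp : Int),
    (List.range lsls.length).map
        (fun (i : Nat) => (sp + (i : Int), [(pref lsls wp).getD i 0, (pref lsls wp).getD (i + 1) 0 - 1]))
      = emit lsls sp wp := by
  induction lsls with
  | nil => intro sp wp; simp [emit]
  | cons sen rest ih =>
      intro sp wp
      rw [List.length_cons, List.range_succ_eq_map]
      simp only [List.map_cons, emit, pref]
      congr 1
      · cases rest <;> simp [pref]
      · rw [List.map_map, ← ih (sp + 1) (wp + sen.length)]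
        apply List.map_congr_left
        intro i _
        simp only [Function.comp_apply, List.getD_cons_succ, Prod.mk.injEq]
        refine ⟨by push_cast; ring, ?_⟩
        simp

lemma labelLoopA_items (lsls : List (List Int)) : ∀ (sp wp : Int) (d : PySem.Dict Int (List Int)),
    (∀ k ∈ d.keys, k < sp) → d.keys.Nodup →
    (labelLoopA lsls sp wp d).items = d.items ++ emit lsls sp wp := by
  induction lsls with
  | nil => intro sp wp d _ _; simp [labelLoopA, emit]
  | cons sen rest ih =>
      intro sp wp d hlt hnd
      have hnc : d.contains sp = false := by
        by_contra h
        have : d.contains sp = true := by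
          cases hc : d.contains sp
          · exact absurd hc h
          · rfl
        have hmem : sp ∈ d.keys := (PySem.Dict.contains_iff_mem_keys d sp).mp this
        exact absurd (hlt sp hmem) (by omega)
      simp only [labelLoopA]
      rw [ih (sp + 1) _ _ ?hlt ?hnd]
      · rw [PySem.Dict.items_insert_of_not_contains _ _ hnc]
        simp [emit]
      case hlt =>
        intro k hk
        rw [PySem.Dict.keys_insert_of_not_contains _ _ hnc] at hk
        rcases List.mem_append.mp hk with h | h
        · exact lt_trans (hlt k h) (by omega)
        · simp at h; omega
      case hnd =>
        rw [PySem.Dict.keys_insert_of_not_contains _ _ hnc]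
        refine List.Nodup.append hnd (List.nodup_singleton sp) ?_
        intro k hk hk'
        simp at hk'
        subst hk'
        exact absurd (hlt k hk) (by omega)

-- ===== VERDICT (by name: the statement is the Claim_ definition above) =====
theorem label_positions_spec : Claim_equal_label_positions := by
  intro lsls _
  show label_positions lsls = label_positions_alt lsls
  rw [label_positions, labelLoopA_items lsls 0 0 PySem.Dict.empty (by simp) (by simp)]
  rw [label_positions_alt, buildCum_eq_pref, ← map_range_pref lsls 0 0]
  simp [PySem.Dict.empty]
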